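-- pv_equiv track=rewrite | github.com/jmetzz/sandbox-python | src/leetcode/p_1750_min_length_string_after_deleting_similar_ends.py | minimum_length_loop
-- ===== SOURCE A (Python) =====
-- def minimum_length_loop(sequence: str) -> int:
--     low, high = 0, len(sequence) - 1
--     while low < high and sequence[low] == sequence[high]:
--         ch = sequence[low]
--         while low <= high and sequence[low] == ch:
--             low += 1
--         while low <= high and sequence[high] == ch:
--             high -= 1
--     return high - low + 1
-- ===== SOURCE B (Python) =====
-- def minimum_length_loop(sequence: str) -> int:
--     s = sequence
--     while len(s) > 1 and s[0] == s[-1]: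
--         s = s.strip(s[0])
--     return len(s)
-- ===== Notes on version B (the rewrite author's own statement) =====
-- stated objective: simpler
-- what changed: Replaces the two-index walk with its three nested while loops by a shrinking-string loop: while the ends match, strip the boundary character's leading and trailing runs with str.strip, then return the remaining length.
import Mathlib
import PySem

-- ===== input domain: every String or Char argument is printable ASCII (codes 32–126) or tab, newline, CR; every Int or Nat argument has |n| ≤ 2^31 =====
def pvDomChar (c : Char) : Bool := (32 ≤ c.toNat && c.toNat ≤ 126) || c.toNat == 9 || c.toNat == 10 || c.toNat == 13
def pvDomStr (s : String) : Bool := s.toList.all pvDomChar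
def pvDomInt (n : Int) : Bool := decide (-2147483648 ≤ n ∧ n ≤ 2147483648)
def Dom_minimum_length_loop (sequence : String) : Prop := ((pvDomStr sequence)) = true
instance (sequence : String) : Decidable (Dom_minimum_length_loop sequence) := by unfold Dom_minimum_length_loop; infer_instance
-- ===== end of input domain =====

-- B replaces A's two-index walk (outer while + two inner scan whiles) by a shrinking-string
-- loop that strips the boundary character's runs with str.strip; objective: simpler.

-- ===== PORT A =====
-- inner loop `while low <= high and sequence[low] == ch: low += 1`
-- (sequence[low] raises only outside [0,len); on every state reached from the entry
--  low is in range whenever low ≤ high, so `pyGet? = some ch` is exact)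
def skipLowA (cs : List Char) (ch : Char) (high : Int) (low : Int) : Int :=
  if h : low ≤ high ∧ PySem.List.pyGet? cs low = some ch then
    skipLowA cs ch high (low + 1)
  else low
termination_by (high + 1 - low).toNat
decreasing_by omega

-- inner loop `while low <= high and sequence[high] == ch: high -= 1`
def skipHighA (cs : List Char) (ch : Char) (low : Int) (high : Int) : Int :=
  if h : low ≤ high ∧ PySem.List.pyGet? cs high = some ch then
    skipHighA cs ch low (high - 1)
  else high
termination_by (high + 1 - low).toNat
decreasing_by omega

theorem skipLowA_ge (cs : List Char) (ch : Char) (high low : Int) :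
    low ≤ skipLowA cs ch high low := by
  fun_induction skipLowA cs ch high low with
  | case1 low h ih => omega
  | case2 low h => omega

theorem skipLowA_succ_le (cs : List Char) (ch : Char) (high low : Int)
    (h1 : low ≤ high) (h2 : PySem.List.pyGet? cs low = some ch) :
    low + 1 ≤ skipLowA cs ch high low := by
  rw [skipLowA]
  rw [dif_pos ⟨h1, h2⟩]
  exact skipLowA_ge cs ch high (low + 1)

theorem skipHighA_le (cs : List Char) (ch : Char) (low high : Int) :
    skipHighA cs ch low high ≤ high := by
  fun_induction skipHighA cs ch low high with
  | case1 high h ih => omega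
  | case2 high h => omega

-- outer loop `while low < high and sequence[low] == sequence[high]: …`.
-- Python indexes sequence[low]/sequence[high] only when low < high (then both are in
-- range on every reachable state); the match also returns high - low + 1 when an index
-- is out of range, which is unreachable from the entry call.
def loopA (cs : List Char) (low high : Int) : Int :=
  match h1 : PySem.List.pyGet? cs low, h2 : PySem.List.pyGet? cs high with
  | some a, some b =>
    if h : low < high ∧ a = b then
      let low' := skipLowA cs a high low
      let high' := skipHighA cs a low' high
      loopA cs low' high'
    else high - low + 1
  | _, _ => high - low + 1
termination_by (high + 1 - low).toNat
decreasing_by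
  have hge := skipLowA_succ_le cs a high low (le_of_lt h.1) h1
  have hle := skipHighA_le cs a (skipLowA cs a high low) high
  omega

def minimum_length_loop (sequence : String) : Int :=
  loopA sequence.toList 0 ((sequence.toList.length : Int) - 1)

-- ===== PORT B =====
-- s.strip(c) for a single character c peels the leading and trailing runs of c
theorem stripChars_singleton (ch : Char) (l : List Char) :
    PySem.Chars.stripChars l [ch] = (l.dropWhile (· == ch)).rdropWhile (· == ch) := by
  have hp : (fun c => List.contains [ch] c) = (fun c => c == ch) := by
    funext c; simp only [List.contains_cons, List.contains_nil, Bool.or_false]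
  simp only [PySem.Chars.stripChars, List.rdropWhile, hp]

-- `s = s.strip(s[0])`; the strip shortens s because s[0] itself is stripped
theorem stripB_length_lt (l : List Char) (h : 0 < l.length) :
    (PySem.Chars.stripChars l [(PySem.List.pyGet? l 0).getD ' ']).length < l.length := by
  rcases l with _ | ⟨c, rest⟩
  · simp at h
  · rw [PySem.List.pyGet?_zero_cons, Option.getD_some, stripChars_singleton]
    have h1 : ((c :: rest).dropWhile (· == c)) = rest.dropWhile (· == c) := by
      rw [List.dropWhile_cons]; simp
    calc (((c :: rest).dropWhile (· == c)).rdropWhile (· == c)).length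
        ≤ ((c :: rest).dropWhile (· == c)).length := (List.rdropWhile_prefix _ _).length_le
      _ = (rest.dropWhile (· == c)).length := by rw [h1]
      _ ≤ rest.length := (List.dropWhile_suffix _).length_le
      _ < (c :: rest).length := by simp

-- `while len(s) > 1 and s[0] == s[-1]: s = s.strip(s[0])`
def loopB (l : List Char) : List Char :=
  if h : 1 < l.length ∧ PySem.List.pyGet? l 0 = PySem.List.pyGet? l (-1) then
    loopB (PySem.Chars.stripChars l [(PySem.List.pyGet? l 0).getD ' '])
  else l
termination_by l.length
decreasing_by exact stripB_length_lt l (by omega)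

def minimum_length_loop_alt (sequence : String) : Int :=
  ((loopB sequence.toList).length : Int)

-- ===== PRECONDITION & SPEC =====
def Spec_minimum_length_loop (sequence : String) (out : Int) : Prop := out = minimum_length_loop_alt sequence
instance (sequence : String) (out : Int) : Decidable (Spec_minimum_length_loop sequence out) := by unfold Spec_minimum_length_loop; infer_instance

-- ===== CLAIM (what is proved, stated in full; the proofs are below) =====
def Claim_equal_minimum_length_loop : Prop := ∀ (sequence : String), Dom_minimum_length_loop sequence → Spec_minimum_length_loop sequence (minimum_length_loop sequence)

-- ===== LEMMAS AND PROOFS =====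

theorem skipLowA_spec (cs : List Char) (ch : Char) :
    ∀ (n l : Nat), l + n ≤ cs.length →
      skipLowA cs ch ((l : Int) + n - 1) l
        = (l : Int) + (((cs.drop l).take n).takeWhile (· == ch)).length := by
  intro n
  induction n with
  | zero =>
    intro l hl
    rw [skipLowA, dif_neg (by rintro ⟨h1, -⟩; omega)]
    simp
  | succ n ih =>
    intro l hl
    have hlt : l < cs.length := by omega
    have hget : PySem.List.pyGet? cs (l : Int) = some cs[l] :=
      PySem.List.pyGet?_ofNat cs l hlt
    have hdrop : cs.drop l = cs[l] :: cs.drop (l + 1) := List.drop_eq_getElem_cons hlt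
    rw [skipLowA]
    by_cases hc : cs[l] = ch
    · rw [dif_pos ⟨by push_cast; omega, by rw [hget, hc]⟩]
      have ih' := ih (l + 1) (by omega)
      have he : ((l + 1 : Nat) : Int) + (n : Int) - 1 = (l : Int) + ((n + 1 : Nat) : Int) - 1 := by
        push_cast; ring
      rw [he] at ih'
      rw [show ((l + 1 : Nat) : Int) = (l : Int) + 1 from by push_cast; ring] at ih'
      rw [ih', hdrop]
      simp only [List.take_succ_cons, List.takeWhile_cons, hc, beq_self_eq_true,
        if_true, List.length_cons]
      push_cast; ring
    · rw [dif_neg (by rintro ⟨-, h2⟩; rw [hget] at h2; exact hc (Option.some.inj h2))]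
      rw [hdrop]
      simp [hc]

theorem skipHighA_spec (cs : List Char) (ch : Char) :
    ∀ (m l : Nat), l + m ≤ cs.length →
      skipHighA cs ch l ((l : Int) + m - 1)
        = (l : Int) + (((cs.drop l).take m).rdropWhile (· == ch)).length - 1 := by
  intro m
  induction m with
  | zero =>
    intro l hl
    rw [skipHighA, dif_neg (by rintro ⟨h1, -⟩; omega)]
    simp [List.rdropWhile]
  | succ m ih =>
    intro l hl
    have hlt : l + m < cs.length := by omega
    have hget : PySem.List.pyGet? cs ((l + m : Nat) : Int) = some cs[l + m] :=
      PySem.List.pyGet?_ofNat cs (l + m) hlt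
    have hh : (l : Int) + ((m + 1 : Nat) : Int) - 1 = ((l + m : Nat) : Int) := by push_cast; ring
    have hidx : (cs.drop l)[m]? = some cs[l + m] := by
      rw [List.getElem?_drop]; exact List.getElem?_eq_getElem hlt
    have hw : (cs.drop l).take (m + 1) = (cs.drop l).take m ++ [cs[l + m]] := by
      rw [List.take_succ, hidx]; rfl
    rw [hh, skipHighA]
    by_cases hc : cs[l + m] = ch
    · rw [dif_pos ⟨by push_cast; omega, by rw [hget, hc]⟩]
      have ih' := ih l (by omega)
      rw [show ((l + m : Nat) : Int) - 1 = (l : Int) + (m : Int) - 1 from by push_cast; ring, ih']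
      rw [hw, List.rdropWhile_concat, if_pos (by simp [hc])]
    · rw [dif_neg (by rintro ⟨-, h2⟩; rw [hget] at h2; exact hc (Option.some.inj h2))]
      rw [hw, List.rdropWhile_concat, if_neg (by simp [hc])]
      have hlen : (List.take m (List.drop l cs)).length = m := by
        simp [List.length_take, List.length_drop]; omega
      simp [hlen]
      omega

theorem loopA_of_not_lt (cs : List Char) (low high : Int) (h : ¬ low < high) :
    loopA cs low high = high - low + 1 := by
  rw [loopA.eq_def]
  split
  · rw [dif_neg (fun hc => h hc.1)]
  · rfl

theorem loopA_eq_loopB (cs : List Char) :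
    ∀ (n l : Nat), l + n ≤ cs.length →
      loopA cs l ((l : Int) + n - 1) = ((loopB ((cs.drop l).take n)).length : Int) := by
  intro n
  induction n using Nat.strong_induction_on with
  | _ n IH =>
  intro l hl
  rcases Nat.lt_or_ge n 2 with hn | hn
  · -- n = 0 or n = 1 : the outer guard low < high is false and loopB stops at once
    interval_cases n
    · rw [loopA_of_not_lt cs _ _ (by push_cast; omega)]
      rw [show (cs.drop l).take 0 = [] from rfl, loopB, dif_neg (by simp)]
      simp
    · rw [loopA_of_not_lt cs _ _ (by push_cast; omega)]
      have hlen : ((cs.drop l).take 1).length = 1 := by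
        simp [List.length_take, List.length_drop]; omega
      rw [loopB, dif_neg (by rintro ⟨h1, -⟩; omega)]
      rw [hlen]; push_cast; ring
  · obtain ⟨m, rfl⟩ : ∃ m, n = m + 2 := ⟨n - 2, by omega⟩
    have hl1 : l < cs.length := by omega
    have hlN : l + (m + 1) < cs.length := by omega
    have hA : PySem.List.pyGet? cs (l : Int) = some cs[l] :=
      PySem.List.pyGet?_ofNat cs l hl1
    have hB : PySem.List.pyGet? cs ((l + (m + 1) : Nat) : Int) = some cs[l + (m + 1)] :=
      PySem.List.pyGet?_ofNat cs (l + (m + 1)) hlN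
    have hBi : ((l : Int) + ((m + 2 : Nat) : Int) - 1) = ((l + (m + 1) : Nat) : Int) := by
      push_cast; ring
    set w := (cs.drop l).take (m + 2) with hwdef
    have hwlen : w.length = m + 2 := by
      simp [hwdef, List.length_take, List.length_drop]; omega
    have hw0 : PySem.List.pyGet? w 0 = some cs[l] := by
      rw [PySem.List.pyGet?_zero, hwdef, List.getElem?_take, if_pos (by omega),
        List.getElem?_drop]
      exact List.getElem?_eq_getElem (by omega)
    have hwlast : PySem.List.pyGet? w (-1) = some cs[l + (m + 1)] := by
      rw [PySem.List.pyGet?_neg_one, List.getLast?_eq_getElem?, hwlen]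
      rw [show m + 2 - 1 = m + 1 from rfl, hwdef, List.getElem?_take, if_pos (by omega),
        List.getElem?_drop]
      exact List.getElem?_eq_getElem (by omega)
    rw [loopA.eq_def]
    split
    case _ a b h1 h2 =>
      rw [hA] at h1
      obtain rfl : a = cs[l] := (Option.some.inj h1).symm
      rw [hBi, hB] at h2
      obtain rfl : b = cs[l + (m + 1)] := (Option.some.inj h2).symm
      by_cases hab : cs[l] = cs[l + (m + 1)]
      · rw [dif_pos ⟨by push_cast; omega, hab⟩]
        have hsl := skipLowA_spec cs cs[l] (m + 2) l (by omega)
        rw [← hwdef] at hsl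
        set k := ((w.takeWhile (· == cs[l])).length) with hkdef
        have hwcons : w = cs[l] :: ((cs.drop (l + 1)).take (m + 1)) := by
          rw [hwdef, List.drop_eq_getElem_cons hl1, List.take_succ_cons]
        have hk1 : 1 ≤ k := by
          rw [hkdef, hwcons, List.takeWhile_cons]; simp
        have hk2 : k ≤ m + 2 := by
          calc k ≤ w.length := (List.takeWhile_prefix _).length_le
          _ = m + 2 := hwlen
        have hr0 : ∀ r : Nat, r ≤ m + 2 - k → r < m + 2 := by omega
        have hsh := skipHighA_spec cs cs[l] (m + 2 - k) (l + k) (by omega)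
        set v := (cs.drop (l + k)).take (m + 2 - k) with hvdef
        set r := (v.rdropWhile (· == cs[l])).length with hrdef
        have hrle : r ≤ m + 2 - k := by
          calc r ≤ v.length := (List.rdropWhile_prefix _ _).length_le
          _ ≤ m + 2 - k := by simp [hvdef, List.length_take]
        have hH : ((l + k : Nat) : Int) + ((m + 2 - k : Nat) : Int) - 1
            = (l : Int) + ((m + 2 : Nat) : Int) - 1 := by omega
        rw [hsl, show ((l : Int) + (k : Int)) = ((l + k : Nat) : Int) from by push_cast; ring,
          ← hH]
        show loopA cs ((l + k : Nat) : Int)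
            (skipHighA cs cs[l] ((l + k : Nat) : Int)
              (((l + k : Nat) : Int) + ((m + 2 - k : Nat) : Int) - 1)) = ((loopB w).length : Int)
        rw [hsh]
        rw [IH r (hr0 r hrle) (l + k) (by omega)]
        have hstep : loopB w = loopB ((cs.drop (l + k)).take r) := by
          rw [loopB, dif_pos ⟨by rw [hwlen]; omega, by rw [hw0, hwlast, hab]⟩]
          rw [hw0]
          congr 1
          rw [Option.getD_some, stripChars_singleton]
          have hdw : w.dropWhile (· == cs[l]) = v := by
            have hdk : w.dropWhile (· == cs[l]) = w.drop k := by
              conv_rhs => rw [← List.takeWhile_append_dropWhile (p := (· == cs[l])) (l := w)]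
              rw [hkdef, List.drop_left]
            rw [hdk, hwdef, List.drop_take, List.drop_drop, hvdef]
          rw [hdw]
          have hpref := List.rdropWhile_prefix (· == cs[l]) v
          rw [List.prefix_iff_eq_take] at hpref
          rw [hpref, ← hrdef, hvdef, List.take_take, show min r (m + 2 - k) = r from by omega]
        rw [hstep]
      · rw [dif_neg (by rintro ⟨-, h⟩; exact hab h)]
        rw [loopB, dif_neg (by rintro ⟨-, h⟩; rw [hw0, hwlast] at h; exact hab (Option.some.inj h))]
        rw [hwlen]; push_cast; ring
    next h =>
      exfalso
      rw [hBi] at h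
      exact h cs[l] cs[l + (m + 1)] hA hB

-- ===== VERDICT (by name: the statement is the Claim_ definition above) =====
theorem minimum_length_loop_spec : Claim_equal_minimum_length_loop := by
  intro s _
  unfold Spec_minimum_length_loop minimum_length_loop minimum_length_loop_alt
  have h := loopA_eq_loopB s.toList s.toList.length 0 (by omega)
  rw [List.drop_zero, List.take_length] at h
  simpa using h
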